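-- pv_equiv track=rewrite | github.com/Indiana3/python_exercises | wb_chapter8/exercise176.py | natoPhoneticAlphabet
-- ===== SOURCE A (Python) =====
-- def natoPhoneticAlphabet(s):
--     nato_phonetic_alphabet = {"a": "Alpha", "b": "Bravo", "c": "Charlie", "d": "Delta",
--     "e": "Echo", "f": "Foxtrot", "g": "Golf", "h": "Hotel", "i": "India", "j": "Juliet",
--     "k": "Kilo", "l": "Lima", "m": "Mike", "n": "November", "o": "Oscar", "p": "Papa",
--     "q": "Quebec", "r": "Romeo", "s": "Sierra", "t": "Tango", "u": "Uniform", "v": "Victor",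
--     "w": "Whiskey", "x": "Xray", "y": "Yankee", "z": "Zulu"}
--     # Base case
--     if s == "":
--         return ""
--     # Recursive case
--     else:
--         return nato_phonetic_alphabet[s[0]] + " " + natoPhoneticAlphabet(s[1:len(s)])
-- ===== SOURCE B (Python) =====
-- NATO_WORDS = ["Alpha", "Bravo", "Charlie", "Delta", "Echo", "Foxtrot", "Golf",
--               "Hotel", "India", "Juliet", "Kilo", "Lima", "Mike", "November",
--               "Oscar", "Papa", "Quebec", "Romeo", "Sierra", "Tango", "Uniform",
--               "Victor", "Whiskey", "Xray", "Yankee", "Zulu"]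
--
-- def natoPhoneticAlphabet(s):
--     return "".join(NATO_WORDS[ord(c) - ord("a")] + " " for c in s)
-- ===== Notes on version B (the rewrite author's own statement) =====
-- stated objective: faster
-- what changed: Replaced the recursion with slicing and a per-call dict rebuild/lookup by a single iterative ''.join pass that indexes a fixed 26-word list by character code (ord(c)-ord('a')), keeping each word's trailing space.
import Mathlib
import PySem

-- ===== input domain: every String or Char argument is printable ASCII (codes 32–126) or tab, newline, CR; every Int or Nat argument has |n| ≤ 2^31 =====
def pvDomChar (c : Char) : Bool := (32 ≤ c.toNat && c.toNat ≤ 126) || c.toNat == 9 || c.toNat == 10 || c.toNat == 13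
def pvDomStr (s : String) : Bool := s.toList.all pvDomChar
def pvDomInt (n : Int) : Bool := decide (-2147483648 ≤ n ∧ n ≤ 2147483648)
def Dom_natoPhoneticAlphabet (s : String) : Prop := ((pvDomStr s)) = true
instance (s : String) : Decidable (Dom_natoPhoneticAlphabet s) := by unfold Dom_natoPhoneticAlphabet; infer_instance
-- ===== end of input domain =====

-- B replaces A's dict-lookup recursion (with slicing) by one iterative join pass indexing a fixed word list by character code; faster in a timing run.

-- ===== PORT A =====
-- the NATO dict A builds on each call (keyed by Char: every Python key is a 1-char string)
def natoDict : PySem.Dict Char String := PySem.Dict.ofList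
  [('a', "Alpha"), ('b', "Bravo"), ('c', "Charlie"), ('d', "Delta"),
   ('e', "Echo"), ('f', "Foxtrot"), ('g', "Golf"), ('h', "Hotel"), ('i', "India"), ('j', "Juliet"),
   ('k', "Kilo"), ('l', "Lima"), ('m', "Mike"), ('n', "November"), ('o', "Oscar"), ('p', "Papa"),
   ('q', "Quebec"), ('r', "Romeo"), ('s', "Sierra"), ('t', "Tango"), ('u', "Uniform"), ('v', "Victor"),
   ('w', "Whiskey"), ('x', "Xray"), ('y', "Yankee"), ('z', "Zulu")]

-- A's recursion on s: empty base case, else dict[s[0]] + " " + recurse(s[1:]); KeyError excluded by Pre_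
def natoAChars : List Char → String
  | [] => ""
  | c :: cs => natoDict.getD c "" ++ " " ++ natoAChars cs

def natoPhoneticAlphabet (s : String) : String := natoAChars s.toList

-- ===== PORT B =====
-- B's module-level word list, indexed by ord(c) - ord('a')
def natoWords : List String :=
  ["Alpha", "Bravo", "Charlie", "Delta", "Echo", "Foxtrot", "Golf",
   "Hotel", "India", "Juliet", "Kilo", "Lima", "Mike", "November",
   "Oscar", "Papa", "Quebec", "Romeo", "Sierra", "Tango", "Uniform",
   "Victor", "Whiskey", "Xray", "Yankee", "Zulu"]

-- B: join of NATO_WORDS[ord(c)-97] + " " for each character c of s (IndexError excluded by Pre_)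
def natoPhoneticAlphabet_alt (s : String) : String :=
  String.join (s.toList.map (fun c =>
    (PySem.List.pyGet? natoWords ((c.toNat : Int) - 97)).getD "" ++ " "))

-- ===== PRECONDITION & SPEC =====
-- A raises KeyError (and B IndexError) on any character that is not a lowercase ASCII letter: those inputs are excluded.
def Pre_natoPhoneticAlphabet (s : String) : Prop :=
  (s.toList.all (fun c => 97 ≤ c.toNat && c.toNat ≤ 122)) = true
instance (s : String) : Decidable (Pre_natoPhoneticAlphabet s) := by
  unfold Pre_natoPhoneticAlphabet; infer_instance

def pvWitness_natoPhoneticAlphabet : String := "abc"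

def Spec_natoPhoneticAlphabet (s : String) (out : String) : Prop := out = natoPhoneticAlphabet_alt s
instance (s : String) (out : String) : Decidable (Spec_natoPhoneticAlphabet s out) := by
  unfold Spec_natoPhoneticAlphabet; infer_instance

-- ===== CLAIM (what is proved, stated in full; the proofs are below) =====
def Claim_equal_natoPhoneticAlphabet : Prop := ∀ (s : String), Dom_natoPhoneticAlphabet s → Pre_natoPhoneticAlphabet s → Spec_natoPhoneticAlphabet s (natoPhoneticAlphabet s)

-- ===== LEMMAS AND PROOFS =====
theorem string_join_cons (x : String) (l : List String) :
    String.join (x :: l) = x ++ String.join l := by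
  have h : ∀ (l : List String) (a : String), l.foldl (· ++ ·) a = a ++ String.join l := by
    intro l
    induction l with
    | nil => intro a; simp [String.join]
    | cons y ys ih =>
        intro a
        simp only [String.join, List.foldl_cons] at *
        rw [ih (a ++ y), ih ("" ++ y)]
        simp [String.append_assoc]
  simp only [String.join, List.foldl_cons]
  exact h l x

-- on lowercase letters, the dict lookup and the index lookup agree
theorem dict_eq_index (c : Char) (h1 : 97 ≤ c.toNat) (h2 : c.toNat ≤ 122) :
    natoDict.getD c "" = (PySem.List.pyGet? natoWords ((c.toNat : Int) - 97)).getD "" := by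
  have hc : Char.ofNat c.toNat = c := Char.ofNat_toNat c
  set n := c.toNat with hn
  rw [← hc]
  interval_cases n <;> decide

theorem natoAChars_eq_join (cs : List Char)
    (h : (cs.all (fun c => 97 ≤ c.toNat && c.toNat ≤ 122)) = true) :
    natoAChars cs =
      String.join (cs.map (fun c =>
        (PySem.List.pyGet? natoWords ((c.toNat : Int) - 97)).getD "" ++ " ")) := by
  induction cs with
  | nil => simp [natoAChars, String.join]
  | cons c cs ih =>
      simp only [List.all_cons, Bool.and_eq_true, Bool.and_eq_true, decide_eq_true_eq] at h
      rw [List.map_cons, string_join_cons, natoAChars, ih h.2,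
        dict_eq_index c h.1.1 h.1.2, String.append_assoc]

-- ===== VERDICT (by name: the statement is the Claim_ definition above) =====
theorem natoPhoneticAlphabet_spec : Claim_equal_natoPhoneticAlphabet := by
  intro s _ hp
  unfold Spec_natoPhoneticAlphabet natoPhoneticAlphabet natoPhoneticAlphabet_alt
  exact natoAChars_eq_join s.toList hp
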